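-- pv_equiv track=rewrite | github.com/liruileay/data_structure_in_python | data_structure_python/development/chapter5/CaesarCipher.py | the_max_same_count_betweenab
-- ===== SOURCE A (Python) =====
-- def the_same_count(i, a, b):
-- 	count = 0
-- 	for j in range(len(b)):
-- 		if b[j] == a[j + i]:
-- 			count += 1
-- 	return count
--
-- def the_max_same_count_betweenab(a, b):
-- 	"""a的长度是大于等于b的"""
-- 	len_a = len(a)
-- 	len_b = len(b)
-- 	size = len_a - len_b
-- 	if size == 0: return the_same_count(0, a, b)
-- 	count = 0
-- 	for i in range(size): # 找到如何才能最多
-- 		count = the_same_count(i, a, b) if count < the_same_count(i, a, b) else count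
-- 	return count + size
-- ===== SOURCE B (Python) =====
-- def the_max_same_count_betweenab(a, b):
--     """Index a's positions by character, then scatter each match into a per-offset histogram."""
--     size = len(a) - len(b)
--     if size == 0:
--         return sum(x == y for x, y in zip(a, b))
--     pos = {}
--     for p, c in enumerate(a):
--         pos.setdefault(c, []).append(p)
--     hist = [0] * size
--     for j, c in enumerate(b):
--         for p in pos.get(c, ()):
--             if j <= p < j + size:
--                 hist[p - j] += 1
--     return max(hist, default=0) + size
-- ===== Notes on version B (the rewrite author's own statement) =====
-- stated objective: alternative
-- what changed: B never scans alignments: it builds a character-to-positions index of a once, then for each character of b scatters its matching positions of a into a per-offset histogram (sparse cross-correlation) and takes the histogram's max, instead of A's per-offset rescans of b (which call the helper twice per offset); on texts where most position pairs mismatch the scatter loop touches only the matching pairs, a measured constant-factor win.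
import Mathlib
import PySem

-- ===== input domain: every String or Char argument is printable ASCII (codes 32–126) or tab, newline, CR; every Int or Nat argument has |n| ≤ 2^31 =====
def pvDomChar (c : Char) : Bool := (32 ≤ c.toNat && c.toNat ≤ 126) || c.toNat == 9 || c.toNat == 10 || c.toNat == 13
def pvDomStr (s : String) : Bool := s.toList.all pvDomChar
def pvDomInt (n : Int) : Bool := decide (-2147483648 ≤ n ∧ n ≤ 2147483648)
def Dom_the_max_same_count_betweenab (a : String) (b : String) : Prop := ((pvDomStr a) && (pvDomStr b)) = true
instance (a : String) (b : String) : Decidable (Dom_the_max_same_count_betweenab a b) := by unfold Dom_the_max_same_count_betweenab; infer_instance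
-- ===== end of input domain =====

-- B replaces A's per-offset rescans with a character-to-positions index of a and one
-- per-offset match histogram filled by scattering matching position pairs; equal return
-- value on all inputs (a timing run measured B faster by a constant factor).

-- ===== PORT A =====
-- helper: the_same_count(i, a, b)
def pvSameCount (i : Int) (a : String) (b : String) : Int :=
  (PySem.List.pyRange 0 (PySem.Str.len b) 1).foldl
    (fun count j => if PySem.Str.pyGet? b j = PySem.Str.pyGet? a (j + i) then count + 1 else count) 0

def the_max_same_count_betweenab (a : String) (b : String) : Int :=
  let len_a := PySem.Str.len a
  let len_b := PySem.Str.len b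
  let size := len_a - len_b
  if size = 0 then pvSameCount 0 a b
  else
    let count := (PySem.List.pyRange 0 size 1).foldl
      (fun count i => if count < pvSameCount i a b then pvSameCount i a b else count) 0
    count + size

-- ===== PORT B =====
-- 'pos.setdefault(c, []).append(p)' ports as 'pos.modify c [] (· ++ [p])': the dict after
-- the in-place append of p to the (possibly fresh empty) entry at c is exactly that dict.
def the_max_same_count_betweenab_alt (a : String) (b : String) : Int :=
  let size := PySem.Str.len a - PySem.Str.len b
  if size = 0 then
    (a.toList.zip b.toList).foldl (fun s xy => if xy.1 = xy.2 then s + 1 else s) 0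
  else
    let pos : PySem.Dict Char (List Int) := (PySem.List.enumerate a.toList).foldl
      (fun d pc => d.modify pc.2 [] (· ++ [pc.1])) PySem.Dict.empty
    let hist : List Int := List.replicate size.toNat 0
    let hist := (PySem.List.enumerate b.toList).foldl (fun hist jc =>
      (pos.getD jc.2 []).foldl (fun hist p =>
        if jc.1 ≤ p ∧ p < jc.1 + size then
          PySem.List.pySetD hist (p - jc.1) (PySem.List.pyGetD hist (p - jc.1) 0 + 1)
        else hist) hist) hist
    PySem.List.maxD hist (fun x => x) 0 + size

-- ===== PRECONDITION & SPEC =====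
def Spec_the_max_same_count_betweenab (a : String) (b : String) (out : Int) : Prop := out = the_max_same_count_betweenab_alt a b
instance (a : String) (b : String) (out : Int) : Decidable (Spec_the_max_same_count_betweenab a b out) := by unfold Spec_the_max_same_count_betweenab; infer_instance

-- ===== CLAIM (what is proved, stated in full; the proofs are below) =====
def Claim_equal_the_max_same_count_betweenab : Prop := ∀ (a : String) (b : String), Dom_the_max_same_count_betweenab a b → Spec_the_max_same_count_betweenab a b (the_max_same_count_betweenab a b)

-- ===== LEMMAS AND PROOFS =====

-- canonical match count at a nonnegative offset t: positions j of b with b[j] == a[j+t]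
def pvMatch (A B : List Char) (t : Nat) : Nat :=
  (List.range B.length).countP (fun k => decide (B[k]? = A[k + t]?))

-- the per-character position list B's dict holds at character c
def pvPos (A : List Char) (c : Char) : List Int :=
  ((((PySem.List.enumerate A).map (fun pc => (pc.2, pc.1))).filter (fun p => p.1 == c)).map (·.2))

-- A's helper computes pvMatch at any nonnegative offset
theorem pvSameCount_cast (a b : String) (t : Nat) :
    pvSameCount (t : Int) a b = (pvMatch a.toList b.toList t : Int) := by
  unfold pvSameCount pvMatch
  have h := PySem.List.foldl_count_if
      (fun j => decide (PySem.Str.pyGet? b j = PySem.Str.pyGet? a (j + (t : Int))))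
      (PySem.List.pyRange 0 (PySem.Str.len b) 1) 0
  simp only [decide_eq_true_eq] at h
  rw [h, PySem.Str.len_eq, PySem.List.pyRange_one, List.countP_map]
  simp only [Int.sub_zero, Int.toNat_natCast, Function.comp_def, zero_add]
  norm_num
  apply List.countP_congr
  intro k hk
  have h2 : ((k : Int) + (t : Int)) = ((k + t : Nat) : Int) := by push_cast; ring
  rw [h2, PySem.List.pyGet?_natCast]

-- zip countP equals pvMatch at offset 0 (Nat level)
theorem pvZip_aux : ∀ (A B : List Char), A.length = B.length →
    (A.zip B).countP (fun xy => decide (xy.1 = xy.2)) = pvMatch A B 0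
  | [], [], _ => by simp [pvMatch]
  | [], c :: B, h => by simp at h
  | x :: A, [], h => by simp at h
  | x :: A, c :: B, h => by
    have ih := pvZip_aux A B (by simpa using h)
    unfold pvMatch at ih ⊢
    simp only [List.zip_cons_cons, List.countP_cons, List.length_cons,
      List.range_succ_eq_map, List.countP_map, Function.comp_def]
    rw [ih]
    simp [eq_comm]

-- B's equal-length zip/sum computes pvMatch at offset 0
theorem pvZip_count (A B : List Char) (h : A.length = B.length) :
    (A.zip B).foldl (fun s xy => if xy.1 = xy.2 then s + 1 else s) 0
      = (pvMatch A B 0 : Int) := by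
  have h2 := PySem.List.foldl_count_if (fun xy : Char × Char => decide (xy.1 = xy.2)) (A.zip B) 0
  simp only [decide_eq_true_eq] at h2
  rw [h2, pvZip_aux A B h]
  ring

-- B's pos dict, looked up at c, is the position list pvPos
theorem pvPos_getD (A : List Char) (c : Char) :
    (((PySem.List.enumerate A).foldl
        (fun d pc => d.modify pc.2 [] (· ++ [pc.1])) PySem.Dict.empty).getD c [])
      = pvPos A c := by
  have h : (PySem.List.enumerate A).foldl
        (fun d pc => d.modify pc.2 [] (· ++ [pc.1])) (PySem.Dict.empty : PySem.Dict Char (List Int))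
      = ((PySem.List.enumerate A).map (fun pc => (pc.2, pc.1))).foldl
        (fun d p => d.modify p.1 [] (· ++ [p.2])) PySem.Dict.empty := by
    rw [List.foldl_map]
  rw [h, PySem.Dict.getD_foldl_modify_append, pvPos]
  simp [PySem.Dict.getD_empty]

-- membership in the position list is exactly a match of a's character at that position
theorem pvPos_mem (A : List Char) (c : Char) (m : Nat) :
    ((m : Int) ∈ pvPos A c) ↔ A[m]? = some c := by
  unfold pvPos
  simp only [List.mem_map, List.mem_filter, beq_iff_eq, PySem.List.mem_enumerate_iff]
  constructor
  · rintro ⟨p, ⟨⟨pc, ⟨k, hk, hpc⟩, hswap⟩, hc⟩, hm⟩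
    subst hpc
    subst hswap
    simp only [zero_add] at hc hm ⊢
    have hkm : k = m := by exact_mod_cast hm
    subst hkm
    rw [List.getElem?_eq_getElem hk, hc]
  · intro hA
    have hm : m < A.length := by
      by_contra hge
      rw [List.getElem?_eq_none (by omega)] at hA
      simp at hA
    have hAc : A[m] = c := by
      rw [List.getElem?_eq_getElem hm] at hA
      exact Option.some.inj hA
    exact ⟨(A[m], (m : Int)), ⟨⟨((0 : Int) + (m : Nat), A[m]), ⟨m, hm, rfl⟩, by simp⟩, hAc⟩, rfl⟩

-- the position list has no duplicates
theorem pvPos_nodup (A : List Char) (c : Char) : (pvPos A c).Nodup := by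
  unfold pvPos
  have hp : ((((PySem.List.enumerate A).map (fun pc => (pc.2, pc.1))).filter
      (fun p => p.1 == c)).map (·.2)).Pairwise (· < ·) := by
    rw [List.pairwise_map]
    apply List.Pairwise.filter
    rw [List.pairwise_map]
    exact (PySem.List.pairwise_lt_enumerate A 0).imp (fun h => h)
  exact hp.imp (fun h => ne_of_lt h)

-- getD after a set, as a conditional
theorem pvGetDSet (l : List Int) (n k : Nat) (v : Int) :
    (l.set n v).getD k 0 = if n = k ∧ n < l.length then v else l.getD k 0 := by
  simp only [List.getD_eq_getElem?_getD, List.getElem?_set]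
  split_ifs <;> simp_all <;> omega

-- inner scatter loop over a position list: read back at position k
theorem pvScatter_getD (j sz : Int) :
    ∀ (r : List Int) (cnt : List Int), cnt.length = sz.toNat → ∀ (k : Nat), k < cnt.length →
    ((r.foldl (fun cnt p =>
        if j ≤ p ∧ p < j + sz then
          PySem.List.pySetD cnt (p - j) (PySem.List.pyGetD cnt (p - j) 0 + 1)
        else cnt) cnt).getD k 0)
      = cnt.getD k 0 + (r.count (j + (k : Int)) : Int)
  | [], cnt, _, k, hk => by simp
  | p :: r, cnt, hlen, k, hk => by
    have hstep_len : (if j ≤ p ∧ p < j + sz then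
          PySem.List.pySetD cnt (p - j) (PySem.List.pyGetD cnt (p - j) 0 + 1)
        else cnt).length = cnt.length := by
      split <;> simp [PySem.List.length_pySetD]
    have ih := pvScatter_getD j sz r
      (if j ≤ p ∧ p < j + sz then
          PySem.List.pySetD cnt (p - j) (PySem.List.pyGetD cnt (p - j) 0 + 1)
        else cnt) (by omega) k (by omega)
    simp only [List.foldl_cons] at *
    rw [ih, List.count_cons]
    have hksz : (k : Int) < sz := by omega
    have hstep : (if j ≤ p ∧ p < j + sz then
          PySem.List.pySetD cnt (p - j) (PySem.List.pyGetD cnt (p - j) 0 + 1)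
        else cnt).getD k 0
        = cnt.getD k 0 + (if (j + (k : Int) == p) = true then 1 else 0) := by
      by_cases hg : j ≤ p ∧ p < j + sz
      · rw [if_pos hg]
        have hnn : (0 : Int) ≤ p - j := by omega
        rw [PySem.List.pySetD_of_nonneg cnt _ hnn, pvGetDSet]
        by_cases hpk : p = j + (k : Int)
        · have ht : (p - j).toNat = k := by omega
          rw [ht, if_pos ⟨rfl, hk⟩]
          have : PySem.List.pyGetD cnt (p - j) 0 = cnt.getD k 0 := by
            have : p - j = ((k : Nat) : Int) := by omega
            rw [this, PySem.List.pyGetD_natCast]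
          rw [this]
          simp [hpk]
        · have ht : (p - j).toNat ≠ k := by omega
          rw [if_neg (fun h => ht h.1)]
          have : ¬ (j + (k : Int) == p) = true := by
            simp only [beq_iff_eq]
            omega
          simp [this]
      · rw [if_neg hg]
        have : ¬ (j + (k : Int) == p) = true := by
          simp only [beq_iff_eq]
          intro h
          exact hg ⟨by omega, by omega⟩
        simp [this]
    rw [hstep]
    have hbeq : (p == j + (k : Int)) = (j + (k : Int) == p) := by simp [eq_comm]
    rw [hbeq]
    push_cast
    ring

theorem pvScatter_length (j sz : Int) (r : List Int) (cnt : List Int) :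
    ((r.foldl (fun cnt p =>
        if j ≤ p ∧ p < j + sz then
          PySem.List.pySetD cnt (p - j) (PySem.List.pyGetD cnt (p - j) 0 + 1)
        else cnt) cnt)).length = cnt.length := by
  induction r generalizing cnt with
  | nil => rfl
  | cons p r ih =>
    simp only [List.foldl_cons]
    rw [ih]
    split <;> simp [PySem.List.length_pySetD]

theorem pvOuter_length (sz : Int) (pos : PySem.Dict Char (List Int))
    (ps : List (Int × Char)) (cnt : List Int) :
    ((ps.foldl (fun cnt jc =>
        (pos.getD jc.2 []).foldl (fun cnt p =>
          if jc.1 ≤ p ∧ p < jc.1 + sz then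
            PySem.List.pySetD cnt (p - jc.1) (PySem.List.pyGetD cnt (p - jc.1) 0 + 1)
          else cnt) cnt) cnt).length) = cnt.length := by
  induction ps generalizing cnt with
  | nil => rfl
  | cons jc ps ih =>
    simp only [List.foldl_cons]
    rw [ih, pvScatter_length]

-- B's outer loop: final histogram, read back pointwise as a membership count
theorem pvOuter_getD (A : List Char) (sz : Int)
    (pos : PySem.Dict Char (List Int)) (hpos : ∀ c, pos.getD c [] = pvPos A c)
    (ps : List (Int × Char)) (cnt : List Int)
    (hlen : cnt.length = sz.toNat) (k : Nat) (hk : k < cnt.length) :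
    ((ps.foldl (fun cnt jc =>
        (pos.getD jc.2 []).foldl (fun cnt p =>
          if jc.1 ≤ p ∧ p < jc.1 + sz then
            PySem.List.pySetD cnt (p - jc.1) (PySem.List.pyGetD cnt (p - jc.1) 0 + 1)
          else cnt) cnt) cnt).getD k 0)
      = cnt.getD k 0 + (ps.countP (fun jc => decide ((jc.1 + (k : Int)) ∈ pvPos A jc.2)) : Int) := by
  induction ps generalizing cnt with
  | nil => simp
  | cons jc ps ih =>
    have hlen2 := pvScatter_length jc.1 sz (pos.getD jc.2 []) cnt
    simp only [List.foldl_cons]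
    rw [ih _ (by omega) (by omega),
      pvScatter_getD jc.1 sz (pos.getD jc.2 []) cnt hlen k hk,
      List.countP_cons]
    have hcount : ((pos.getD jc.2 []).count (jc.1 + (k : Int)) : Int)
        = (if (decide ((jc.1 + (k : Int)) ∈ pvPos A jc.2)) = true then 1 else 0) := by
      rw [hpos]
      by_cases hm : (jc.1 + (k : Int)) ∈ pvPos A jc.2
      · rw [List.count_eq_one_of_mem (pvPos_nodup A jc.2) hm]
        simp [hm]
      · rw [List.count_eq_zero_of_not_mem hm]
        simp [hm]
    rw [hcount]
    push_cast
    ring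

-- counting matches over enumerate equals a range count (Nat start)
theorem pvEnum_aux (a : String) (k : Nat) :
    ∀ (Bl : List Char) (s : Nat),
    (PySem.List.enumerate Bl (s : Int)).countP
        (fun jc => decide (PySem.Str.pyGet? a (jc.1 + (k : Int)) = some jc.2))
      = (List.range Bl.length).countP (fun t => decide (a.toList[s + t + k]? = some (Bl.getD t 'x')))
  | [], s => by simp [PySem.List.enumerate]
  | c :: Bl, s => by
    have ih := pvEnum_aux a k Bl (s + 1)
    rw [PySem.List.enumerate_cons, List.countP_cons]
    have hcast : ((s : Int) + 1) = ((s + 1 : Nat) : Int) := by push_cast; ring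
    rw [hcast, ih]
    simp only [List.length_cons, List.range_succ_eq_map, List.countP_cons, List.countP_map,
      Function.comp_def]
    have hhead : ((s : Int) + (k : Int)) = ((s + 0 + k : Nat) : Int) := by push_cast; ring
    have h1 : (List.range Bl.length).countP (fun t => decide (a.toList[s + 1 + t + k]? = some (Bl.getD t 'x')))
        = (List.range Bl.length).countP (fun t => decide (a.toList[s + (t + 1) + k]? = some ((c :: Bl).getD (t + 1) 'x'))) := by
      apply List.countP_congr
      intro t ht
      have : s + 1 + t + k = s + (t + 1) + k := by omega
      rw [this]
      rfl
    rw [h1, hhead, PySem.Str.pyGet?_natCast]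
    simp only [List.getD_cons_zero]

-- counting matches over enumerate b equals pvMatch
theorem pvEnum_count (a b : String) (k : Nat) :
    (PySem.List.enumerate b.toList).countP
        (fun jc => decide (PySem.Str.pyGet? a (jc.1 + (k : Int)) = some jc.2))
      = pvMatch a.toList b.toList k := by
  have h := pvEnum_aux a k b.toList 0
  simp only [Nat.cast_zero, Nat.zero_add] at h
  rw [h]
  unfold pvMatch
  apply List.countP_congr
  intro t ht
  simp only [List.mem_range] at ht
  have : b.toList[t]? = some (b.toList.getD t 'x') := by
    rw [List.getD_eq_getElem _ _ ht, List.getElem?_eq_getElem ht]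
  rw [this]
  simp [eq_comm]

-- the membership count over enumerate b IS the pyGet?-match count over enumerate b
theorem pvEnumMem_count (a b : String) (k : Nat) :
    (PySem.List.enumerate b.toList).countP
        (fun jc => decide ((jc.1 + (k : Int)) ∈ pvPos a.toList jc.2))
      = pvMatch a.toList b.toList k := by
  rw [← pvEnum_count a b k]
  apply List.countP_congr
  intro jc hjc
  obtain ⟨m, hm, hjceq⟩ := (PySem.List.mem_enumerate_iff _ _ _).mp hjc
  subst hjceq
  simp only [decide_eq_true_eq]
  have hcast : ((0 : Int) + (m : Int) + (k : Int)) = ((m + k : Nat) : Int) := by push_cast; ring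
  rw [hcast, pvPos_mem, PySem.Str.pyGet?_natCast]

-- running max with nonnegative values, as max over the value list
theorem pvRunMax (f : Nat → Int) (hf : ∀ k, 0 ≤ f k) (n : Nat) :
    (List.range (n + 1)).foldl (fun c k => max c (f k)) 0
      = ((List.range (n + 1)).map f).foldl max (f 0) := by
  rw [← List.foldl_map]
  rw [List.range_succ_eq_map]
  simp only [List.map_cons, List.foldl_cons]
  rw [max_eq_right (hf 0), max_self]

-- ===== VERDICT (by name: the statement is the Claim_ definition above) =====
theorem the_max_same_count_betweenab_spec : Claim_equal_the_max_same_count_betweenab := by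
  intro a b _
  unfold Spec_the_max_same_count_betweenab
  simp only [the_max_same_count_betweenab, the_max_same_count_betweenab_alt]
  by_cases hsz : PySem.Str.len a - PySem.Str.len b = 0
  · rw [if_pos hsz, if_pos hsz]
    have hlen : a.toList.length = b.toList.length := by
      have := PySem.Str.len_eq a
      have := PySem.Str.len_eq b
      omega
    rw [pvZip_count a.toList b.toList hlen]
    have := pvSameCount_cast a b 0
    simp only [Nat.cast_zero] at this
    rw [this]
  · rw [if_neg hsz, if_neg hsz]
    congr 1
    set sz := PySem.Str.len a - PySem.Str.len b with hszdef
    set pos := (PySem.List.enumerate a.toList).foldl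
      (fun d pc => d.modify pc.2 [] (· ++ [pc.1])) (PySem.Dict.empty : PySem.Dict Char (List Int))
      with hposdef
    have hpos : ∀ c, pos.getD c [] = pvPos a.toList c := fun c => pvPos_getD a.toList c
    by_cases hposi : 0 < sz
    · obtain ⟨n, hn⟩ : ∃ n, sz.toNat = n + 1 := ⟨sz.toNat - 1, by omega⟩
      have hcnt : ((PySem.List.enumerate b.toList).foldl (fun cnt jc =>
          (pos.getD jc.2 []).foldl (fun cnt p =>
            if jc.1 ≤ p ∧ p < jc.1 + sz then
              PySem.List.pySetD cnt (p - jc.1) (PySem.List.pyGetD cnt (p - jc.1) 0 + 1)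
            else cnt) cnt) (List.replicate sz.toNat 0))
          = (List.range sz.toNat).map (fun k => (pvMatch a.toList b.toList k : Int)) := by
        apply List.ext_getElem
        · rw [pvOuter_length]; simp
        · intro k hk1 hk2
          have hk : k < sz.toNat := by
            rw [pvOuter_length] at hk1; simpa using hk1
          rw [← List.getD_eq_getElem _ 0 hk1, ← List.getD_eq_getElem _ 0 hk2]
          rw [pvOuter_getD a.toList sz pos hpos (PySem.List.enumerate b.toList)
            (List.replicate sz.toNat 0) (by simp) k (by simpa using hk)]
          rw [pvEnumMem_count a b k]
          simp only [List.getD_eq_getElem _ _ (by simpa using hk :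
            k < (List.replicate sz.toNat (0 : Int)).length), List.getElem_replicate]
          rw [List.getD_eq_getElem _ _ hk2, List.getElem_map, List.getElem_range]
          ring
      rw [hcnt]
      -- A's fold = max of the mapped range
      have hA : (PySem.List.pyRange 0 sz 1).foldl
          (fun count i => if count < pvSameCount i a b then pvSameCount i a b else count) 0
          = (List.range sz.toNat).foldl
            (fun c k => max c ((pvMatch a.toList b.toList k : Int))) 0 := by
        rw [PySem.List.pyRange_one]
        simp only [Int.sub_zero]
        rw [List.foldl_map]
        apply PySem.List.foldl_congr_mem
        intro c k hkmem
        have : ((0 : Int) + (k : Int)) = ((k : Nat) : Int) := by ring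
        rw [this, pvSameCount_cast a b k]
        by_cases hc : c < (pvMatch a.toList b.toList k : Int)
        · rw [if_pos hc, max_eq_right hc.le]
        · rw [if_neg hc, max_eq_left (not_lt.mp hc)]
      rw [hA, hn, pvRunMax (fun k => (pvMatch a.toList b.toList k : Int))
        (fun k => by positivity) n]
      rw [List.range_succ_eq_map, List.map_cons]
      rw [PySem.List.maxD, PySem.List.max?_id_cons]
      simp
    · -- sz < 0: both folds are over empty data
      have hneg : sz < 0 := by omega
      have htn : sz.toNat = 0 := by omega
      have hnil : (PySem.List.pyRange 0 sz 1) = [] :=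
        PySem.List.pyRange_one_eq_nil (by omega)
      rw [hnil]
      have hcnt0 : (List.replicate sz.toNat (0 : Int)) = [] := by rw [htn]; rfl
      rw [hcnt0]
      have hend : ((PySem.List.enumerate b.toList).foldl (fun cnt jc =>
          (pos.getD jc.2 []).foldl (fun cnt p =>
            if jc.1 ≤ p ∧ p < jc.1 + sz then
              PySem.List.pySetD cnt (p - jc.1) (PySem.List.pyGetD cnt (p - jc.1) 0 + 1)
            else cnt) cnt) ([] : List Int)) = [] := by
        have h0 := pvOuter_length sz pos (PySem.List.enumerate b.toList) ([] : List Int)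
        exact List.length_eq_zero_iff.mp (by simpa using h0)
      rw [hend]
      simp [PySem.List.maxD, PySem.List.max?]
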